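-- pv_equiv track=rewrite | github.com/santuhazra1/EPAI | Phase 1/EPAi_Session_5-master/session5.py | squared_power_list
-- ===== SOURCE A (Python) =====
-- def squared_power_list(x, start, end):
--     if x <= 0:
--         raise ValueError('Negative or zero positional argument. Please provide one positive argument for powered list')
--
--     elif start > end:
--         raise ValueError('Invalid start and end argument. Please provide start value less than end value')
--
--     else:
--         powered_list =[]
--         for i in range(start, end + 1):
--             value = x ** i
--             powered_list.append(value)
--     return powered_list
-- ===== SOURCE B (Python) =====
-- def squared_power_list(x, start, end):
--     # Back-to-front: compute only the HIGHEST power once, then walk DOWN by exact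
--     # division, collecting descending powers, and reverse at the end.
--     if x <= 0:
--         raise ValueError('Negative or zero positional argument. Please provide one positive argument for powered list')
--     if start > end:
--         raise ValueError('Invalid start and end argument. Please provide start value less than end value')
--     result = []
--     value = x ** end
--     i = end
--     while i >= start:
--         result.append(value)
--         value //= x
--         i -= 1
--     result.reverse()
--     return result
-- ===== Notes on version B (the rewrite author's own statement) =====
-- stated objective: alternative
-- what changed: B computes only the top power x**end once and walks downward with exact integer division (value //= x) in a while loop, collecting the descending powers and reversing the list at the end, instead of A's ascending for-loop with a fresh exponentiation x**i per element.
-- outside the precondition, e.g. on squared_power_list(2, -3, -1): A returns [0.125, 0.25, 0.5], B returns [0.0, 0.0, 0.5]; on squared_power_list(0, 1, 2): A raises ValueError, B raises ValueError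
import Mathlib
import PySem

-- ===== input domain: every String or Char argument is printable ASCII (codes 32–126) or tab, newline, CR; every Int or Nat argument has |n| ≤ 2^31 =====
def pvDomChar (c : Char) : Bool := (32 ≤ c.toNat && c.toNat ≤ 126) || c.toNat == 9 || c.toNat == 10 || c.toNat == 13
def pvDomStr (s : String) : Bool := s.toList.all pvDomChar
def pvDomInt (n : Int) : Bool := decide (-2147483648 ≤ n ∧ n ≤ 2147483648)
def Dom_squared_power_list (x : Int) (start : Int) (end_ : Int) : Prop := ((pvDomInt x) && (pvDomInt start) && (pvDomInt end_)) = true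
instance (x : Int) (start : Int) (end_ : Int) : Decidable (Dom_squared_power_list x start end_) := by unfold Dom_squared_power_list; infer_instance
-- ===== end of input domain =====

-- B computes the top power x**end once and walks DOWN by exact integer division,
-- reversing the collected descending powers (objective: alternative, same cost).

-- ===== PORT A =====
-- A raises ValueError when x ≤ 0 or start > end_; the port returns [] there (excluded by Pre_).
def squared_power_list (x : Int) (start : Int) (end_ : Int) : List Int :=
  if x ≤ 0 then []
  else if start > end_ then []
  else (PySem.List.pyRange start (end_ + 1) 1).foldl
        (fun powered_list i => powered_list ++ [x ^ i.toNat]) []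

-- ===== PORT B =====
-- B's while loop 'i >= start: append value; value //= x; i -= 1' runs
-- (end_ + 1 - start) times; ported as recursion on that count.
def spl_down (x : Int) : Int → Nat → List Int → List Int
  | _, 0, result => result
  | value, n + 1, result => spl_down x (PySem.Int.floordiv value x) n (result ++ [value])

def squared_power_list_alt (x : Int) (start : Int) (end_ : Int) : List Int :=
  if x ≤ 0 then []
  else if start > end_ then []
  else (spl_down x (x ^ end_.toNat) (end_ + 1 - start).toNat []).reverse

-- ===== PRECONDITION & SPEC =====
-- Pre_ excludes the inputs where A raises ValueError (x ≤ 0 or start > end_) and the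
-- inputs with start < 0, on which Python's x ** i with negative i yields floats, i.e.
-- a list that is not of the declared type List Int.
def Pre_squared_power_list (x : Int) (start : Int) (end_ : Int) : Prop :=
  1 ≤ x ∧ 0 ≤ start ∧ start ≤ end_
instance (x : Int) (start : Int) (end_ : Int) : Decidable (Pre_squared_power_list x start end_) := by
  unfold Pre_squared_power_list; infer_instance
def pvWitness_squared_power_list : Int × Int × Int := (2, 0, 9)

def Spec_squared_power_list (x : Int) (start : Int) (end_ : Int) (out : List Int) : Prop := out = squared_power_list_alt x start end_
instance (x : Int) (start : Int) (end_ : Int) (out : List Int) : Decidable (Spec_squared_power_list x start end_ out) := by unfold Spec_squared_power_list; infer_instance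

-- ===== CLAIM (what is proved, stated in full; the proofs are below) =====
def Claim_equal_squared_power_list : Prop := ∀ (x : Int) (start : Int) (end_ : Int), Dom_squared_power_list x start end_ → Pre_squared_power_list x start end_ → Spec_squared_power_list x start end_ (squared_power_list x start end_)

-- ===== LEMMAS AND PROOFS =====

-- Exact division step: (x^(m+1)) // x = x^m for positive x.
theorem spl_floordiv_pow (x : Int) (hx : 0 < x) (m : Nat) :
    PySem.Int.floordiv (x ^ (m + 1)) x = x ^ m := by
  rw [PySem.Int.floordiv_eq_ediv_of_pos hx, pow_succ, Int.mul_ediv_cancel _ (by omega)]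

-- A's fold appends the ascending powers x^s, …, x^(s+n-1).
theorem spl_foldA_eq_map (x : Int) (n : Nat) :
    ∀ (s : Int), 0 ≤ s → ∀ (acc : List Int),
    (PySem.List.pyRange s (s + n) 1).foldl
        (fun powered_list i => powered_list ++ [x ^ i.toNat]) acc
      = acc ++ (List.range n).map (fun k => x ^ (s.toNat + k)) := by
  induction n with
  | zero => intro s _ acc; rw [PySem.List.pyRange_one_eq_nil (by omega)]; simp
  | succ m ih =>
      intro s hs acc
      rw [PySem.List.pyRange_one_cons (by omega)]
      simp only [List.foldl_cons]
      have h1 : s + (↑(m + 1) : Int) = (s + 1) + (↑m : Int) := by push_cast; ring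
      rw [h1, ih (s + 1) (by omega)]
      rw [List.range_succ_eq_map]
      have h2 : (s + 1).toNat = s.toNat + 1 := by omega
      simp [h2, List.map_map, Function.comp_def, Nat.add_comm, Nat.add_left_comm]

-- B's countdown collects the descending powers x^m, x^(m-1), …, x^(m-n+1).
theorem spl_down_eq_map (x : Int) (hx : 0 < x) (n : Nat) :
    ∀ (m : Nat), n ≤ m + 1 → ∀ (acc : List Int),
    spl_down x (x ^ m) n acc = acc ++ (List.range n).map (fun k => x ^ (m - k)) := by
  induction n with
  | zero => intro m _ acc; simp [spl_down]
  | succ p ih =>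
      intro m hm acc
      unfold spl_down
      rcases p with _ | q
      · simp [spl_down]
      · have hm1 : 1 ≤ m := by omega
        have hdiv : PySem.Int.floordiv (x ^ m) x = x ^ (m - 1) := by
          have := spl_floordiv_pow x hx (m - 1)
          rwa [Nat.sub_add_cancel hm1] at this
        rw [hdiv, ih (m - 1) (by omega)]
        have : ∀ k, m - 1 - k = m - (k + 1) := by omega
        simp [List.range_succ_eq_map, List.map_map, Function.comp_def, this]

-- ===== VERDICT (by name: the statement is the Claim_ definition above) =====
theorem squared_power_list_spec : Claim_equal_squared_power_list := by
  intro x start end_ _ hpre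
  obtain ⟨hx, hs, hse⟩ := hpre
  unfold Spec_squared_power_list squared_power_list squared_power_list_alt
  rw [if_neg (by omega), if_neg (by omega), if_neg (by omega), if_neg (by omega)]
  set n : Nat := (end_ + 1 - start).toNat with hn
  have hA : start + (n : Int) = end_ + 1 := by omega
  rw [← hA, spl_foldA_eq_map x n start hs []]
  have hle : n ≤ end_.toNat + 1 := by omega
  rw [spl_down_eq_map x (by omega) n end_.toNat hle []]
  simp only [List.nil_append]
  apply List.ext_getElem
  · simp
  · intro i h1 h2
    simp only [List.getElem_reverse, List.getElem_map, List.getElem_range]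
    have hi : i < n := by simpa using h1
    have : end_.toNat - ((List.range n).map (fun k => x ^ (end_.toNat - k))).length.pred.sub i
        = start.toNat + i := by simp; omega
    congr 1
    simp at hi ⊢
    omega
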